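-- pv_equiv track=rewrite | github.com/cselab/covid19 | epidemics/utils/postprocessing_params.py | joinres
-- ===== SOURCE A (Python) =====
-- def joinres(a,b,c,d,e):
--     dct0 = dict(b)
--     dct1 = dict(c)
--     dct2 = dict(e)
--     tmp0 = dict([ (k, [v]+[dct0[k]]+list(dct1[k])) for k,v in d if k in dct1 ])
--     tmp1 = dict([ (k, [v]+list(tmp0[k])) for k,v in e if k in tmp0 ])
--     ret = [ (k, [v]+list(tmp1[k])) for k,v in a if k in tmp1 ]
--     return ret
-- ===== SOURCE B (Python) =====
-- def joinres(a, b, c, d, e):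
--     B, C, D, E = dict(b), dict(c), dict(d), dict(e)
--     out = []
--     for k, v in a:
--         if k in C and k in D and k in E:
--             out.append((k, [v, E[k], D[k], B[k]] + list(C[k])))
--     return out
-- ===== Notes on version B (the rewrite author's own statement) =====
-- stated objective: simpler
-- what changed: Replaces A's two chained intermediate-record dict comprehensions (tmp0 over d, tmp1 over e) with four independent lookup dicts and a single filtering pass over a that assembles each record directly.
import Mathlib
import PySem

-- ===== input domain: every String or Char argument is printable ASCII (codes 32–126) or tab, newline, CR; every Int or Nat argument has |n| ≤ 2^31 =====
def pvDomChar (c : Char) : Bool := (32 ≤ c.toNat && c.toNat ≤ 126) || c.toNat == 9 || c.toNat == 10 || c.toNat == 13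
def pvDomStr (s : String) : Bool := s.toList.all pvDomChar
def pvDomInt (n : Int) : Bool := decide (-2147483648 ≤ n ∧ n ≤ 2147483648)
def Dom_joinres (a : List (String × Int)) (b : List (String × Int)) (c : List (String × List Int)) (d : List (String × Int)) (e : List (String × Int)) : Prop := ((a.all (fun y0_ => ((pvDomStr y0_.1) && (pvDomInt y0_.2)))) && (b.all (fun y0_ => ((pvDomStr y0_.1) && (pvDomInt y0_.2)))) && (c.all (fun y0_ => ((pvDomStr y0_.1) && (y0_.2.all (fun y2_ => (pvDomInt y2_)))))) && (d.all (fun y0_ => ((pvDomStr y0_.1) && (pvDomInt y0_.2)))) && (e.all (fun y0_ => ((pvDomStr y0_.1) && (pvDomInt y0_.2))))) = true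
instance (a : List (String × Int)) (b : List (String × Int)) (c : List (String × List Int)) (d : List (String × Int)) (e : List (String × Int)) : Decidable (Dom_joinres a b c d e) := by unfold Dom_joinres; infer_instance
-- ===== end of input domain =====

-- B replaces A's two chained intermediate-record dict comprehensions with four independent
-- lookup dicts and one filtering pass over `a` that assembles each record directly (simpler).

-- ===== PORT A =====
-- `dct0[k]` raises KeyError when k ∉ dict(b); Pre_joinres excludes exactly those inputs,
-- so the `.getD _ 0` default is never the value claimed about.
def joinres (a : List (String × Int)) (b : List (String × Int)) (c : List (String × List Int)) (d : List (String × Int)) (e : List (String × Int)) : List (String × List Int) :=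
  let dct0 : PySem.Dict String Int := PySem.Dict.ofList b
  let dct1 : PySem.Dict String (List Int) := PySem.Dict.ofList c
  let _dct2 : PySem.Dict String Int := PySem.Dict.ofList e   -- dead `dct2 = dict(e)` in A
  let tmp0 : PySem.Dict String (List Int) := PySem.Dict.ofList
    ((d.filter (fun p => dct1.contains p.1)).map
      (fun p => (p.1, [p.2] ++ [dct0.getD p.1 0] ++ dct1.getD p.1 [])))
  let tmp1 : PySem.Dict String (List Int) := PySem.Dict.ofList
    ((e.filter (fun p => tmp0.contains p.1)).map
      (fun p => (p.1, [p.2] ++ tmp0.getD p.1 [])))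
  (a.filter (fun p => tmp1.contains p.1)).map
    (fun p => (p.1, [p.2] ++ tmp1.getD p.1 []))

-- ===== PORT B =====
-- `B[k]` raises KeyError when k ∉ dict(b); such inputs are outside Pre_joinres (A already
-- raises there), so the `.getD _ 0` default is never the value claimed about.
def joinres_alt (a : List (String × Int)) (b : List (String × Int)) (c : List (String × List Int)) (d : List (String × Int)) (e : List (String × Int)) : List (String × List Int) :=
  let B : PySem.Dict String Int := PySem.Dict.ofList b
  let C : PySem.Dict String (List Int) := PySem.Dict.ofList c
  let D : PySem.Dict String Int := PySem.Dict.ofList d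
  let E : PySem.Dict String Int := PySem.Dict.ofList e
  a.foldl (fun out p =>
    if C.contains p.1 && D.contains p.1 && E.contains p.1 then
      out ++ [(p.1, [p.2, E.getD p.1 0, D.getD p.1 0, B.getD p.1 0] ++ C.getD p.1 [])]
    else out) []

-- ===== PRECONDITION & SPEC =====
-- Pre_ excludes exactly the inputs where Python A raises KeyError: a key of d that is
-- present in dict(c) but absent from dict(b).
def Pre_joinres (a : List (String × Int)) (b : List (String × Int)) (c : List (String × List Int)) (d : List (String × Int)) (e : List (String × Int)) : Prop :=
  ∀ p ∈ d, (∃ q ∈ c, q.1 = p.1) → ∃ r ∈ b, r.1 = p.1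
instance (a : List (String × Int)) (b : List (String × Int)) (c : List (String × List Int)) (d : List (String × Int)) (e : List (String × Int)) : Decidable (Pre_joinres a b c d e) := by unfold Pre_joinres; infer_instance

def pvWitness_joinres : (List (String × Int)) × (List (String × Int)) × (List (String × List Int)) × (List (String × Int)) × (List (String × Int)) :=
  ([("k", 1)], [("k", 2)], [("k", [3])], [("k", 4)], [("k", 5)])

def Spec_joinres (a : List (String × Int)) (b : List (String × Int)) (c : List (String × List Int)) (d : List (String × Int)) (e : List (String × Int)) (out : List (String × List Int)) : Prop := out = joinres_alt a b c d e
instance (a : List (String × Int)) (b : List (String × Int)) (c : List (String × List Int)) (d : List (String × Int)) (e : List (String × Int)) (out : List (String × List Int)) : Decidable (Spec_joinres a b c d e out) := by unfold Spec_joinres; infer_instance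

-- ===== CLAIM (what is proved, stated in full; the proofs are below) =====
def Claim_equal_joinres : Prop := ∀ (a : List (String × Int)) (b : List (String × Int)) (c : List (String × List Int)) (d : List (String × Int)) (e : List (String × Int)), Dom_joinres a b c d e → Pre_joinres a b c d e → Spec_joinres a b c d e (joinres a b c d e)
-- ===== LEMMAS AND PROOFS =====

-- Last-wins lookup in a raw association list (what Python's dict() builds).
def lastLk {α : Type} : List (String × α) → String → Option α
  | [], _ => none
  | p :: l, k => match lastLk l k with
      | some v => some v
      | none => if p.1 = k then some p.2 else none

theorem get?_foldl_insert {α : Type} (l : List (String × α)) (d : PySem.Dict String α) (k : String) :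
    (l.foldl (fun d p => d.insert p.1 p.2) d).get? k =
      match lastLk l k with
      | some v => some v
      | none => d.get? k := by
  induction l generalizing d with
  | nil => simp [lastLk]
  | cons p l ih =>
      simp only [List.foldl_cons, ih, lastLk]
      cases lastLk l k with
      | some v => rfl
      | none =>
          rw [PySem.Dict.get?_insert]
          by_cases h : p.1 = k
          · simp [h]
          · simp [h, Ne.symm h]

theorem get?_ofList {α : Type} (l : List (String × α)) (k : String) :
    (PySem.Dict.ofList l).get? k = lastLk l k := by
  have h := get?_foldl_insert l PySem.Dict.empty k
  simp only [PySem.Dict.get?_empty] at h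
  exact h.trans (by cases lastLk l k <;> rfl)

theorem lastLk_filter_map {α β : Type} (l : List (String × α)) (q : String → Bool)
    (g : String → α → β) (k : String) :
    lastLk ((l.filter (fun p => q p.1)).map (fun p => (p.1, g p.1 p.2))) k =
      if q k then (lastLk l k).map (g k) else none := by
  induction l with
  | nil => cases hqk : q k <;> simp [lastLk, hqk]
  | cons p l ih =>
      simp only [List.filter_cons]
      by_cases hk : p.1 = k
      · subst hk
        by_cases hq : q p.1
        · simp only [hq, if_true, List.map_cons, lastLk, ih]
          cases lastLk l p.1 <;> simp [hq]
        · have hq' : q p.1 = false := by simpa using hq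
          simp only [hq', Bool.false_eq_true, if_false, ih, lastLk]
          try (cases lastLk l p.1 <;> simp [hq'])
      · by_cases hq : q p.1
        · simp only [hq, if_true, List.map_cons, lastLk, ih]
          cases lastLk l k <;> cases hqk : q k <;> simp [hk, hqk]
        · have hq' : q p.1 = false := by simpa using hq
          simp only [hq', Bool.false_eq_true, if_false, ih, lastLk]
          cases lastLk l k <;> cases hqk : q k <;> simp [hk, hqk]

-- get? of the filtered-map dict comprehensions A builds.
theorem get?_ofList_filter_map {α β : Type} (l : List (String × α)) (q : String → Bool)
    (g : String → α → β) (k : String) :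
    (PySem.Dict.ofList ((l.filter (fun p => q p.1)).map (fun p => (p.1, g p.1 p.2)))).get? k =
      if q k then ((PySem.Dict.ofList l).get? k).map (g k) else none := by
  rw [get?_ofList, lastLk_filter_map, get?_ofList]

theorem joinres_spec : Claim_equal_joinres := by
  intro a b c d e _hdom hpre
  unfold Spec_joinres joinres joinres_alt
  rw [PySem.List.foldl_append_if
    (p := fun p : String × Int =>
      (PySem.Dict.ofList c).contains p.1 && (PySem.Dict.ofList d).contains p.1 &&
        (PySem.Dict.ofList e).contains p.1)
    (f := fun p : String × Int =>
      (p.1, [p.2, (PySem.Dict.ofList e).getD p.1 0, (PySem.Dict.ofList d).getD p.1 0,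
              (PySem.Dict.ofList b).getD p.1 0] ++ (PySem.Dict.ofList c).getD p.1 []))]
  simp only [List.nil_append]
  -- names for the four base dicts and the two intermediate dicts
  set Db := PySem.Dict.ofList b with hDb
  set Dc := PySem.Dict.ofList c with hDc
  set Dd := PySem.Dict.ofList d with hDd
  set De := PySem.Dict.ofList e with hDe
  set tmp0 := PySem.Dict.ofList
      ((d.filter (fun p => Dc.contains p.1)).map
        (fun p => (p.1, [p.2] ++ [Db.getD p.1 0] ++ Dc.getD p.1 []))) with htmp0
  set tmp1 := PySem.Dict.ofList
      ((e.filter (fun p => tmp0.contains p.1)).map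
        (fun p => (p.1, [p.2] ++ tmp0.getD p.1 []))) with htmp1
  have h0 : ∀ k, tmp0.get? k =
      if Dc.contains k then (Dd.get? k).map
        (fun v => [v] ++ [Db.getD k 0] ++ Dc.getD k []) else none := by
    intro k
    rw [htmp0, hDd]
    exact get?_ofList_filter_map d (fun x => Dc.contains x)
      (fun x v => [v] ++ [Db.getD x 0] ++ Dc.getD x []) k
  have h1 : ∀ k, tmp1.get? k =
      if tmp0.contains k then (De.get? k).map
        (fun v => [v] ++ tmp0.getD k []) else none := by
    intro k
    rw [htmp1, hDe]
    exact get?_ofList_filter_map e (fun x => tmp0.contains x)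
      (fun x v => [v] ++ tmp0.getD x []) k
  have hc0 : ∀ k, tmp0.contains k = (Dc.contains k && Dd.contains k) := by
    intro k
    rw [PySem.Dict.contains_eq_isSome_get?, h0, PySem.Dict.contains_eq_isSome_get? Dd]
    cases Dc.contains k <;> simp
  have hc1 : ∀ k, tmp1.contains k = (Dc.contains k && Dd.contains k && De.contains k) := by
    intro k
    rw [PySem.Dict.contains_eq_isSome_get?, h1, hc0, PySem.Dict.contains_eq_isSome_get? De]
    cases hc : (Dc.contains k && Dd.contains k) <;> simp
  have hfil : a.filter (fun p => tmp1.contains p.1) =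
      a.filter (fun p => Dc.contains p.1 && Dd.contains p.1 && De.contains p.1) := by
    apply List.filter_congr
    intro p _
    rw [hc1]
  rw [hfil]
  apply List.map_congr_left
  intro p hp
  have hmem : (Dc.contains p.1 && Dd.contains p.1 && De.contains p.1) = true :=
    (List.mem_filter.mp hp).2
  simp only [Bool.and_eq_true] at hmem
  obtain ⟨⟨hcc, hcd⟩, hce⟩ := hmem
  obtain ⟨vd, hvd⟩ := Option.isSome_iff_exists.mp
    ((PySem.Dict.contains_eq_isSome_get? Dd p.1) ▸ hcd)
  obtain ⟨ve, hve⟩ := Option.isSome_iff_exists.mp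
    ((PySem.Dict.contains_eq_isSome_get? De p.1) ▸ hce)
  have ht0 : tmp0.getD p.1 [] = [vd] ++ [Db.getD p.1 0] ++ Dc.getD p.1 [] := by
    rw [PySem.Dict.getD_eq_get?_getD, h0, hcc]
    simp [hvd]
  have ht1 : tmp1.getD p.1 [] = [ve] ++ tmp0.getD p.1 [] := by
    rw [PySem.Dict.getD_eq_get?_getD, h1, hc0, hcc, hcd]
    simp [hve]
  have hdd : Dd.getD p.1 0 = vd := by rw [PySem.Dict.getD_eq_get?_getD, hvd]; rfl
  have hde : De.getD p.1 0 = ve := by rw [PySem.Dict.getD_eq_get?_getD, hve]; rfl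
  simp [ht1, ht0, hdd, hde]
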